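-- pv_equiv track=rewrite | github.com/matnordlund/netwall-flow-analyzer | backend/app/ingest/reconstruct.py | _extract_bracket_inner_parts
-- ===== SOURCE A (Python) =====
-- from typing import Any, Dict, Iterable, List, Optional, Tuple
--
-- def _extract_bracket_inner_parts(s: str) -> List[str]:
--     """Extract all strings that are inside matching [ ] (including nested)."""
--     parts: List[str] = []
--     i = 0
--     while i < len(s):
--         if s[i] == "[":
--             depth = 1
--             j = i + 1
--             while j < len(s) and depth > 0:
--                 if s[j] == "[":
--                     depth += 1
--                 elif s[j] == "]":
--                     depth -= 1
--                 j += 1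
--             if depth == 0:
--                 inner = s[i + 1 : j - 1]
--                 parts.append(inner)
--                 parts.extend(_extract_bracket_inner_parts(inner))
--             i = j
--         else:
--             i += 1
--     return parts
-- ===== SOURCE B (Python) =====
-- from typing import List
--
-- def _extract_bracket_inner_parts(s: str) -> List[str]:
--     """One left-to-right pass with a stack of open-bracket frames.
--
--     Each frame carries the text accumulated inside its bracket and the
--     pre-order parts of brackets already closed inside it; closing a bracket
--     flushes [inner] + its parts either into the parent frame or the output.
--     """
--     parts: List[str] = []
--     stack: List[List] = []  # frames: [text, kids]
--     for ch in s:
--         if ch == "[":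
--             stack.append(["", []])
--         elif ch == "]" and stack:
--             txt, kids = stack.pop()
--             if stack:
--                 stack[-1][0] += "[" + txt + "]"
--                 stack[-1][1] += [txt] + kids
--             else:
--                 parts += [txt] + kids
--         elif stack:
--             stack[-1][0] += ch
--     return parts
-- ===== Notes on version B (the rewrite author's own statement) =====
-- stated objective: faster
-- what changed: Replaces A's rescanning recursion (for each '[' an inner depth-counting scan, then a full recursive re-parse of the extracted inner text) by a single left-to-right pass over the string with an explicit stack of open-bracket frames, each frame accumulating its inner text and the pre-order parts of brackets closed inside it.
import Mathlib
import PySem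

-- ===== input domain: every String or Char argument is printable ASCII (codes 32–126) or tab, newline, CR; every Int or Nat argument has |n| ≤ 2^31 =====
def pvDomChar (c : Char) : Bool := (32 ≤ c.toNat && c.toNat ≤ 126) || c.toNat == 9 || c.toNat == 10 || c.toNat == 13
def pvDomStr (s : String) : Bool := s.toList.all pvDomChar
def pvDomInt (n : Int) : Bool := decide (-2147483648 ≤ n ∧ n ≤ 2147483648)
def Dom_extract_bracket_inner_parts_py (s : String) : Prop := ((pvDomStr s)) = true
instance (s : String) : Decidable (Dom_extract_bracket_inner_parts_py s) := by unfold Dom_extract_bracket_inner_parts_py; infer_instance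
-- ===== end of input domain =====

-- B replaces A's rescanning recursion by a single pass with a stack of open-bracket
-- frames (objective: faster — no re-parsing of nested content).

-- ===== PORT A =====
-- A's inner while loop: `while j < len(s) and depth > 0: ...; j += 1`.
-- Index access s[j] is guarded by j < len(s), so getD is exact here.
def pvFindClose (cs : List Char) (j : Nat) (d : Int) : Nat × Int :=
  if _h : j < cs.length ∧ 0 < d then
    let c := cs.getD j ' '
    let d' := if c = '[' then d + 1 else if c = ']' then d - 1 else d
    pvFindClose cs (j + 1) d'
  else (j, d)
termination_by cs.length - j
decreasing_by exact Nat.sub_succ_lt_self cs.length j _h.1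

theorem pvFindClose_ge_aux (cs : List Char) : ∀ (n j : Nat) (d : Int), cs.length ≤ j + n → j ≤ (pvFindClose cs j d).1
  | 0, j, d, h => by
    rw [pvFindClose, dif_neg (fun hc => absurd hc.1 (Nat.not_lt.mpr h))]
  | n + 1, j, d, h => by
    rw [pvFindClose]
    by_cases hc : j < cs.length ∧ 0 < d
    · rw [dif_pos hc]
      exact Nat.le_trans (Nat.le_succ j)
        (pvFindClose_ge_aux cs n (j + 1) _ (Nat.le_trans h (Nat.le_of_eq (Nat.add_right_comm j n 1 ▸ rfl))))
    · rw [dif_neg hc]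

theorem pvFindClose_ge (cs : List Char) (j : Nat) (d : Int) : j ≤ (pvFindClose cs j d).1 :=
  pvFindClose_ge_aux cs cs.length j d (Nat.le_add_left cs.length j)

theorem pvTakeDropLt (cs : List Char) (i n : Nat) (h : i < cs.length) :
    (List.take n (cs.drop (i + 1))).length < cs.length := by
  rw [List.length_take, List.length_drop]
  exact Nat.lt_of_le_of_lt (Nat.min_le_right _ _)
    (Nat.sub_lt (Nat.lt_of_le_of_lt (Nat.zero_le i) h) (Nat.succ_pos i))

-- A's outer while loop, recursing on the extracted inner slice exactly as A does.
-- The slice s[i+1 : j-1] (here 0 ≤ i+1 ≤ j-1 ≤ len(s)) is exactly (drop (i+1)).take (j-1-(i+1)).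
def pvGoA (cs : List Char) (i : Nat) : List String :=
  if h : i < cs.length then
    if cs.getD i ' ' = '[' then
      let p := pvFindClose cs (i + 1) 1
      if p.2 = 0 then
        let inner := (cs.drop (i + 1)).take (p.1 - 1 - (i + 1))
        (String.ofList inner :: pvGoA inner 0) ++ pvGoA cs p.1
      else pvGoA cs p.1
    else pvGoA cs (i + 1)
  else []
termination_by (cs.length, cs.length - i)
decreasing_by
  · exact Prod.Lex.left _ _ (pvTakeDropLt cs i _ h)
  · exact Prod.Lex.right _ (Nat.sub_lt_sub_left h (pvFindClose_ge cs (i + 1) 1))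
  · exact Prod.Lex.right _ (Nat.sub_lt_sub_left h (pvFindClose_ge cs (i + 1) 1))
  · exact Prod.Lex.right _ (Nat.sub_succ_lt_self cs.length i h)

def extract_bracket_inner_parts_py (s : String) : List String := pvGoA s.toList 0

-- ===== PORT B =====
-- One step of B's for-loop; a frame on the stack is (text inside the bracket, pre-order kids).
def pvStepB (acc : List String × List (List Char × List String)) (c : Char) :
    List String × List (List Char × List String) :=
  if c = '[' then (acc.1, ([], []) :: acc.2)
  else if c = ']' then
    match acc.2 with
    | [] => (acc.1, [])
    | (txt, kids) :: rest =>
      match rest with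
      | [] => (acc.1 ++ (String.ofList txt :: kids), [])
      | (pt, pk) :: rr => (acc.1, (pt ++ '[' :: txt ++ [']'], pk ++ String.ofList txt :: kids) :: rr)
  else
    match acc.2 with
    | [] => (acc.1, [])
    | (txt, kids) :: rest => (txt ++ [c], kids) :: rest |> fun st => (acc.1, st)

def extract_bracket_inner_parts_py_alt (s : String) : List String :=
  (s.toList.foldl pvStepB ([], [])).1

-- ===== PRECONDITION & SPEC =====
def Spec_extract_bracket_inner_parts_py (s : String) (out : List String) : Prop := out = extract_bracket_inner_parts_py_alt s
instance (s : String) (out : List String) : Decidable (Spec_extract_bracket_inner_parts_py s out) := by unfold Spec_extract_bracket_inner_parts_py; infer_instance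

-- ===== CLAIM (what is proved, stated in full; the proofs are below) =====
def Claim_equal_extract_bracket_inner_parts_py : Prop := ∀ (s : String), Dom_extract_bracket_inner_parts_py s → Spec_extract_bracket_inner_parts_py s (extract_bracket_inner_parts_py s)

-- ===== LEMMAS AND PROOFS =====

def pvDelta (c : Char) : Int := if c = '[' then 1 else if c = ']' then -1 else 0

theorem pvDelta_bound (c : Char) : -1 ≤ pvDelta c ∧ pvDelta c ≤ 1 := by
  constructor <;> (unfold pvDelta; split_ifs <;> omega)

theorem pvDelta_eq (c : Char) (d : Int) :
    (if c = '[' then d + 1 else if c = ']' then d - 1 else d) = d + pvDelta c := by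
  unfold pvDelta; split_ifs <;> omega

-- final bracket balance after scanning w starting from d
def pvRun (d : Int) : List Char → Int
  | [] => d
  | c :: t => pvRun (d + pvDelta c) t

-- the running balance stays ≥ 0 throughout w (starting from d)
def pvNonneg (d : Int) : List Char → Prop
  | [] => True
  | c :: t => 0 ≤ d + pvDelta c ∧ pvNonneg (d + pvDelta c) t

theorem pvRun_append (a b : List Char) : ∀ d, pvRun d (a ++ b) = pvRun (pvRun d a) b := by
  induction a with
  | nil => intro d; simp [pvRun]
  | cons c t ih => intro d; simp [pvRun, ih]

theorem pvRun_shift (w : List Char) : ∀ d, pvRun d w = d + pvRun 0 w := by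
  induction w with
  | nil => intro d; simp [pvRun]
  | cons c t ih =>
    intro d
    simp only [pvRun]
    rw [ih (d + pvDelta c), ih (0 + pvDelta c)]
    omega

theorem pvNonneg_append (a b : List Char) :
    ∀ d, pvNonneg d (a ++ b) ↔ pvNonneg d a ∧ pvNonneg (pvRun d a) b := by
  induction a with
  | nil => intro d; simp [pvNonneg, pvRun]
  | cons c t ih => intro d; simp [pvNonneg, pvRun, ih, and_assoc]

-- structural version of A's inner scan: from depth d, split t at the first point
-- where the depth hits 0 (the matching ']'); the Bool says whether it matched
def pvScan : List Char → Int → List Char × List Char × Bool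
  | [], _ => ([], [], false)
  | c :: r, d =>
    if d + pvDelta c = 0 then ([], r, true)
    else (c :: (pvScan r (d + pvDelta c)).1, (pvScan r (d + pvDelta c)).2)

theorem pvScan_len (t : List Char) : ∀ d : Int, (pvScan t d).2.2 = true →
    (pvScan t d).1.length + (pvScan t d).2.1.length + 1 = t.length := by
  induction t with
  | nil => intro d h; simp [pvScan] at h
  | cons c r ih =>
    intro d h
    simp only [pvScan] at h ⊢
    split_ifs with h0
    · simp
    · simp only [if_neg h0] at h
      have := ih (d + pvDelta c) h
      simp
      omega

-- a successful scan splits t at the matching ']', and the inner part is balanced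
theorem pvScan_true (t : List Char) : ∀ d : Int, 1 ≤ d → (pvScan t d).2.2 = true →
    t = (pvScan t d).1 ++ ']' :: (pvScan t d).2.1
      ∧ pvNonneg (d - 1) (pvScan t d).1 ∧ pvRun (d - 1) (pvScan t d).1 = 0 := by
  induction t with
  | nil => intro d _ h; simp [pvScan] at h
  | cons c r ih =>
    intro d hd h
    simp only [pvScan] at h ⊢
    split_ifs with h0
    · have hc : c = ']' := by
        by_contra hne
        by_cases hb : c = '['
        · simp [pvDelta, hb] at h0; omega
        · simp [pvDelta, hb, hne] at h0; omega
      subst hc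
      simp [pvDelta] at h0
      refine ⟨rfl, trivial, ?_⟩
      simp [pvRun]; omega
    · simp only [if_neg h0] at h
      have hd' : 1 ≤ d + pvDelta c := by have := pvDelta_bound c; omega
      obtain ⟨e1, e2, e3⟩ := ih (d + pvDelta c) hd' h
      refine ⟨by simpa using congrArg (c :: ·) e1, ⟨by omega, ?_⟩, ?_⟩
      · have harith : d - 1 + pvDelta c = d + pvDelta c - 1 := by omega
        simpa [pvNonneg, harith] using e2
      · have harith : d - 1 + pvDelta c = d + pvDelta c - 1 := by omega
        simpa [pvRun, harith] using e3

-- a failed scan means the depth never reached 0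
theorem pvScan_false (t : List Char) : ∀ d : Int, 1 ≤ d → (pvScan t d).2.2 = false →
    pvNonneg (d - 1) t ∧ 1 ≤ pvRun d t := by
  induction t with
  | nil => intro d hd _; exact ⟨trivial, by simpa [pvRun] using hd⟩
  | cons c r ih =>
    intro d hd h
    simp only [pvScan] at h
    by_cases h0 : d + pvDelta c = 0
    · rw [if_pos h0] at h; simp at h
    · rw [if_neg h0] at h
      replace h : (pvScan r (d + pvDelta c)).2.2 = false := by simpa using h
      have hd' : 1 ≤ d + pvDelta c := by have := pvDelta_bound c; omega
      obtain ⟨e1, e2⟩ := ih (d + pvDelta c) hd' h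
      refine ⟨⟨by omega, ?_⟩, by simpa [pvRun] using e2⟩
      have harith : d - 1 + pvDelta c = d + pvDelta c - 1 := by omega
      rw [harith]; exact e1

-- if the balance ends at 0 the scan must succeed
theorem pvScan_hit (t : List Char) : ∀ d : Int, 1 ≤ d → pvRun d t = 0 →
    (pvScan t d).2.2 = true := by
  induction t with
  | nil => intro d hd h; simp [pvRun] at h; omega
  | cons c r ih =>
    intro d hd h
    simp only [pvScan]
    split_ifs with h0
    · rfl
    · have hd' : 1 ≤ d + pvDelta c := by have := pvDelta_bound c; omega
      exact ih (d + pvDelta c) hd' (by simpa [pvRun] using h)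

-- structural version of A's outer loop (proof-side only)
def pvF : List Char → List String
  | [] => []
  | c :: t =>
    if c = '[' then
      match h : pvScan t 1 with
      | (w, rest, true) => (String.ofList w :: pvF w) ++ pvF rest
      | (_, _, false) => []
    else pvF t
termination_by l => l.length
decreasing_by
  · have h2 : (pvScan t 1).2.2 = true := by rw [h]
    have h3 := pvScan_len t 1 h2
    rw [h] at h3
    have h4 : w.length + rest.length + 1 = t.length := h3
    simp only [List.length_cons]; omega
  · have h2 : (pvScan t 1).2.2 = true := by rw [h]
    have h3 := pvScan_len t 1 h2
    rw [h] at h3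
    have h4 : w.length + rest.length + 1 = t.length := h3
    simp only [List.length_cons]; omega
  · simp

-- index-based inner scan = structural inner scan
theorem pvFindClose_eq (cs : List Char) (k : Nat) (d : Int) : k ≤ cs.length → 1 ≤ d →
    (((pvScan (cs.drop k) d).2.2 = true →
        pvFindClose cs k d = (k + (pvScan (cs.drop k) d).1.length + 1, 0)) ∧
     ((pvScan (cs.drop k) d).2.2 = false →
        pvFindClose cs k d = (cs.length, pvRun d (cs.drop k)))) := by
  fun_induction pvFindClose cs k d with
  | case1 j d h c d' ih =>
    intro hk hd
    obtain ⟨hj, _⟩ := h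
    have hdrop : cs.drop j = cs[j] :: cs.drop (j + 1) := List.drop_eq_getElem_cons hj
    have hc : c = cs[j] := List.getD_eq_getElem cs ' ' hj
    have hd'' : d' = d + pvDelta cs[j] := by
      have : d' = d + pvDelta c := pvDelta_eq c d
      rw [this, hc]
    rw [hdrop]
    by_cases h0 : d + pvDelta cs[j] = 0
    · constructor
      · intro _
        simp only [pvScan, if_pos h0]
        rw [pvFindClose, hd'', h0]
        simp
      · intro hfalse
        simp [pvScan, if_pos h0] at hfalse
    · have hd1 : 1 ≤ d + pvDelta cs[j] := by have := pvDelta_bound cs[j]; omega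
      have ih' := ih (by omega) (hd'' ▸ hd1)
      rw [hd''] at *
      constructor
      · intro htrue
        simp only [pvScan, if_neg h0] at htrue ⊢
        rw [ih'.1 htrue]
        simp; omega
      · intro hfalse
        simp only [pvScan, if_neg h0] at hfalse ⊢
        rw [ih'.2 hfalse]
        simp [pvRun]
  | case2 j d h =>
    intro hk hd
    have hj : j = cs.length := by omega
    subst hj
    simp [pvScan, pvRun]

theorem pvGoA_eq (cs : List Char) (i : Nat) : pvGoA cs i = pvF (cs.drop i) := by
  fun_induction pvGoA cs i with
  | case1 cs i h hbr p hp inner ih1 ih2 =>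
    have hdrop : cs.drop i = cs[i] :: cs.drop (i + 1) := List.drop_eq_getElem_cons h
    have hci : cs[i] = '[' := by rw [← List.getD_eq_getElem cs ' ' h]; exact hbr
    have hfc := pvFindClose_eq cs (i + 1) 1 (by omega) le_rfl
    rcases hb : (pvScan (cs.drop (i + 1)) 1).2.2 with _ | _
    · -- scan failed: contradiction with p.2 = 0
      exfalso
      have hv := hfc.2 hb
      have hrun := (pvScan_false (cs.drop (i + 1)) 1 le_rfl hb).2
      have hp2 : p.2 = pvRun 1 (cs.drop (i + 1)) := by
        show (pvFindClose cs (i+1) 1).2 = _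
        rw [hv]
      omega
    · have hfcv := hfc.1 hb
      obtain ⟨hsplit, hnn, hrun⟩ := pvScan_true (cs.drop (i + 1)) 1 le_rfl hb
      set w := (pvScan (cs.drop (i + 1)) 1).1 with hw
      set r := (pvScan (cs.drop (i + 1)) 1).2.1 with hr
      have hp1 : p.1 = i + 1 + w.length + 1 := by
        show (pvFindClose cs (i+1) 1).1 = _
        rw [hfcv]
      have hinner : inner = w := by
        show (cs.drop (i + 1)).take (p.1 - 1 - (i + 1)) = w
        rw [hp1, hsplit]
        have : i + 1 + w.length + 1 - 1 - (i + 1) = w.length := by omega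
        rw [this]
        exact List.take_left
      have hdropp : cs.drop p.1 = r := by
        rw [hp1]
        have : i + 1 + w.length + 1 = (i + 1) + (w.length + 1) := by omega
        rw [this, ← List.drop_drop, hsplit]
        have : w ++ ']' :: r = (w ++ [']']) ++ r := by simp
        rw [this]
        have hlen : (w ++ [']']).length = w.length + 1 := by simp
        rw [← hlen, List.drop_left]
      have hscan : pvScan (cs.drop (i + 1)) 1 = (w, r, true) := by
        rw [hw, hr]
        exact Prod.ext rfl (Prod.ext rfl hb)
      rw [hdrop, hci]
      have hF : pvF ('[' :: cs.drop (i + 1)) = (String.ofList w :: pvF w) ++ pvF r := by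
        rw [pvF, hscan]
        simp
      rw [hinner] at ih1
      rw [List.drop_zero] at ih1
      rw [hF, hinner, ih1, ih2, hdropp]
  | case2 cs i h hbr p hp ih =>
    have hdrop : cs.drop i = cs[i] :: cs.drop (i + 1) := List.drop_eq_getElem_cons h
    have hci : cs[i] = '[' := by rw [← List.getD_eq_getElem cs ' ' h]; exact hbr
    have hfc := pvFindClose_eq cs (i + 1) 1 (by omega) le_rfl
    rcases hb : (pvScan (cs.drop (i + 1)) 1).2.2 with _ | _
    · have hfcv := hfc.2 hb
      have hp1 : p.1 = cs.length := by
        show (pvFindClose cs (i+1) 1).1 = _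
        rw [hfcv]
      rw [ih, hp1, hdrop, hci]
      rw [pvF]
      have hscan : pvScan (cs.drop (i + 1)) 1
          = ((pvScan (cs.drop (i + 1)) 1).1, (pvScan (cs.drop (i + 1)) 1).2.1, false) :=
        Prod.ext rfl (Prod.ext rfl hb)
      rw [hscan]
      simp [pvF]
    · exfalso
      have hfcv := hfc.1 hb
      have : p.2 = 0 := by
        show (pvFindClose cs (i+1) 1).2 = _
        rw [hfcv]
      exact hp this
  | case3 cs i h hbr ih =>
    have hdrop : cs.drop i = cs[i] :: cs.drop (i + 1) := List.drop_eq_getElem_cons h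
    have hci : cs[i] ≠ '[' := by rw [← List.getD_eq_getElem cs ' ' h]; exact hbr
    rw [ih, hdrop, pvF, if_neg hci]
  | case4 cs i h =>
    rw [List.drop_eq_nil_of_le (by omega)]
    simp [pvF]

-- reductions of one step of B's loop
theorem pvStepB_open (parts : List String) (st : List (List Char × List String)) :
    pvStepB (parts, st) '[' = (parts, ([], []) :: st) := by simp [pvStepB]

theorem pvStepB_close_empty (parts : List String) :
    pvStepB (parts, []) ']' = (parts, []) := by simp [pvStepB]

theorem pvStepB_close_top (parts : List String) (txt : List Char) (kids : List String) :
    pvStepB (parts, [(txt, kids)]) ']' = (parts ++ String.ofList txt :: kids, []) := by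
  simp [pvStepB]

theorem pvStepB_close_nest (parts : List String) (txt : List Char) (kids : List String)
    (pt : List Char) (pk : List String) (rr : List (List Char × List String)) :
    pvStepB (parts, (txt, kids) :: (pt, pk) :: rr) ']'
      = (parts, (pt ++ '[' :: txt ++ [']'], pk ++ String.ofList txt :: kids) :: rr) := by
  simp [pvStepB]

theorem pvStepB_other_empty (c : Char) (hc1 : c ≠ '[') (hc2 : c ≠ ']') (parts : List String) :
    pvStepB (parts, []) c = (parts, []) := by simp [pvStepB, hc1, hc2]

theorem pvStepB_other (c : Char) (hc1 : c ≠ '[') (hc2 : c ≠ ']') (parts : List String)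
    (txt : List Char) (kids : List String) (rest : List (List Char × List String)) :
    pvStepB (parts, (txt, kids) :: rest) c = (parts, (txt ++ [c], kids) :: rest) := by
  simp [pvStepB, hc1, hc2]

-- the output list is untouched while the stack stays high enough (unmatched '[' case)
theorem pvParts_stable : ∀ (w : List Char) (parts : List String) (st : List (List Char × List String)),
    st ≠ [] → pvNonneg ((st.length : Int) - 1) w → (w.foldl pvStepB (parts, st)).1 = parts := by
  intro w
  induction w with
  | nil => intro parts st _ _; rfl
  | cons c r ih =>
    intro parts st hst hnn
    obtain ⟨⟨ft, fk⟩, rest, rfl⟩ : ∃ fr rest, st = fr :: rest := by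
      cases st with
      | nil => exact absurd rfl hst
      | cons a b => exact ⟨a, b, rfl⟩
    obtain ⟨h1, h2⟩ := hnn
    simp only [List.foldl_cons]
    by_cases hbr : c = '['
    · subst hbr
      rw [pvStepB_open]
      apply ih _ _ (by simp)
      have e : (((((([], []) : List Char × List String) :: (ft, fk) :: rest).length : Int)) - 1)
          = (((((ft, fk) :: rest).length : Int)) - 1 + pvDelta '[') := by
        have hdo : pvDelta '[' = 1 := by simp [pvDelta]
        simp only [List.length_cons, hdo]
        push_cast; ring
      rw [e]; exact h2
    · by_cases hcl : c = ']'
      · subst hcl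
        have hdm : pvDelta ']' = -1 := by simp [pvDelta]
        rw [hdm] at h1 h2
        obtain ⟨⟨pt, pk⟩, rr, rfl⟩ : ∃ p rr, rest = p :: rr := by
          cases rest with
          | nil => simp at h1
          | cons a b => exact ⟨a, b, rfl⟩
        rw [pvStepB_close_nest]
        apply ih _ _ (by simp)
        have e : ((((pt ++ '[' :: ft ++ [']'], pk ++ String.ofList ft :: fk) :: rr).length : Int) - 1)
            = ((((ft, fk) :: (pt, pk) :: rr).length : Int) - 1 + -1) := by
          simp only [List.length_cons]
          push_cast; ring
        rw [e]; exact h2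
      · have hd0 : pvDelta c = 0 := by simp [pvDelta, hbr, hcl]
        rw [hd0] at h2
        rw [pvStepB_other c hbr hcl]
        apply ih _ _ (by simp)
        have e : ((((ft ++ [c], fk) :: rest).length : Int) - 1)
            = ((((ft, fk) :: rest).length : Int) - 1 + 0) := by
          simp only [List.length_cons]
          push_cast; ring
        rw [e]; exact h2

-- the stack-machine invariants: processing any w at top level appends pvF w to the
-- output; processing a balanced w inside a frame extends that frame's text and kids
theorem pvMain (n : Nat) :
    (∀ w : List Char, w.length ≤ n → ∀ parts : List String,
       (w.foldl pvStepB (parts, [])).1 = parts ++ pvF w) ∧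
    (∀ w : List Char, w.length ≤ n → pvNonneg 0 w → pvRun 0 w = 0 →
       ∀ (parts : List String) (t : List Char) (k : List String) rest,
         w.foldl pvStepB (parts, (t, k) :: rest)
          = (parts, (t ++ w, k ++ pvF w) :: rest)) := by
  induction n with
  | zero =>
    constructor
    · intro w hw parts
      rw [Nat.le_zero] at hw
      rw [List.length_eq_zero_iff] at hw
      subst hw
      simp [pvF]
    · intro w hw _ _ parts t k rest
      rw [Nat.le_zero] at hw
      rw [List.length_eq_zero_iff] at hw
      subst hw
      simp [pvF]
  | succ n ihn =>
    constructor
    · intro w hw parts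
      cases w with
      | nil => simp [pvF]
      | cons c t =>
        have ht : t.length ≤ n := by simpa using hw
        simp only [List.foldl_cons]
        by_cases hbr : c = '['
        · subst hbr
          rw [pvStepB_open]
          rcases hb : (pvScan t 1).2.2 with _ | _
          · -- unmatched '[': the output is untouched and pvF contributes nothing
            have hnn := (pvScan_false t 1 le_rfl hb).1
            rw [pvParts_stable t parts [([], [])] (by simp) (by simpa using hnn)]
            have hFnil : pvF ('[' :: t) = [] := by
              rw [pvF]
              have hscan : pvScan t 1 = ((pvScan t 1).1, (pvScan t 1).2.1, false) :=
                Prod.ext rfl (Prod.ext rfl hb)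
              rw [hscan]
              simp
            rw [hFnil]
            simp
          · obtain ⟨hsplit, hnnw, hrunw⟩ := pvScan_true t 1 le_rfl hb
            have hlen := pvScan_len t 1 hb
            set w' := (pvScan t 1).1 with hw'
            set r := (pvScan t 1).2.1 with hr'
            have hscan : pvScan t 1 = (w', r, true) := Prod.ext rfl (Prod.ext rfl hb)
            have hnnw0 : pvNonneg 0 w' := by simpa using hnnw
            have hrunw0 : pvRun 0 w' = 0 := by simpa using hrunw
            rw [hsplit, List.foldl_append, List.foldl_cons]
            rw [ihn.2 w' (by omega) hnnw0 hrunw0 parts [] [] []]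
            simp only [List.nil_append]
            rw [pvStepB_close_top]
            rw [ihn.1 r (by omega)]
            have hFw : pvF ('[' :: (w' ++ ']' :: r)) = (String.ofList w' :: pvF w') ++ pvF r := by
              rw [pvF, ← hsplit, hscan]
              simp
            rw [hFw]
            simp
        · have hstep : pvStepB (parts, []) c = (parts, []) := by
            by_cases hcl : c = ']'
            · subst hcl; exact pvStepB_close_empty parts
            · exact pvStepB_other_empty c hbr hcl parts
          rw [hstep, ihn.1 t ht, pvF, if_neg hbr]
    · intro w hw hnn hrun parts t0 k rest
      cases w with
      | nil => simp [pvF]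
      | cons c t =>
        have ht : t.length ≤ n := by simpa using hw
        obtain ⟨h1, h2⟩ := hnn
        simp only [pvRun] at hrun
        simp only [List.foldl_cons]
        by_cases hbr : c = '['
        · subst hbr
          have hdo : pvDelta '[' = 1 := by simp [pvDelta]
          rw [hdo] at h1 h2 hrun
          have h1' : pvNonneg 1 t := by simpa using h2
          have hrt : pvRun 1 t = 0 := by simpa using hrun
          have hb := pvScan_hit t 1 le_rfl hrt
          obtain ⟨hsplit, hnnw, hrunw⟩ := pvScan_true t 1 le_rfl hb
          have hlen := pvScan_len t 1 hb
          set w' := (pvScan t 1).1 with hw'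
          set r := (pvScan t 1).2.1 with hr'
          have hscan : pvScan t 1 = (w', r, true) := Prod.ext rfl (Prod.ext rfl hb)
          have hnnw0 : pvNonneg 0 w' := by simpa using hnnw
          have hrunw0 : pvRun 0 w' = 0 := by simpa using hrunw
          have hnnr : pvNonneg 0 r := by
            rw [hsplit, pvNonneg_append, pvRun_shift w' 1, hrunw0] at h1'
            have hx := h1'.2
            have hdm : pvDelta ']' = -1 := by simp [pvDelta]
            simp only [pvNonneg, hdm] at hx
            norm_num at hx
            exact hx
          have hrr : pvRun 0 r = 0 := by
            rw [hsplit, pvRun_append, pvRun_shift w' 1, hrunw0] at hrt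
            have hdm : pvDelta ']' = -1 := by simp [pvDelta]
            simp only [pvRun, hdm] at hrt
            norm_num at hrt
            exact hrt
          rw [pvStepB_open, hsplit, List.foldl_append, List.foldl_cons]
          rw [ihn.2 w' (by omega) hnnw0 hrunw0 parts [] [] ((t0, k) :: rest)]
          simp only [List.nil_append]
          rw [pvStepB_close_nest]
          rw [ihn.2 r (by omega) hnnr hrr parts _ _ rest]
          have hFw : pvF ('[' :: (w' ++ ']' :: r)) = (String.ofList w' :: pvF w') ++ pvF r := by
            rw [pvF, ← hsplit, hscan]
            simp
          rw [hFw]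
          simp
        · by_cases hcl : c = ']'
          · exfalso
            subst hcl
            simp [pvDelta] at h1
          · have hd0 : pvDelta c = 0 := by simp [pvDelta, hbr, hcl]
            rw [hd0] at h2 hrun
            have h2' : pvNonneg 0 t := by simpa using h2
            have hrt : pvRun 0 t = 0 := by simpa using hrun
            rw [pvStepB_other c hbr hcl]
            rw [ihn.2 t ht h2' hrt parts (t0 ++ [c]) k rest]
            rw [pvF, if_neg hbr]
            simp

-- ===== VERDICT (by name: the statement is the Claim_ definition above) =====
theorem extract_bracket_inner_parts_py_spec : Claim_equal_extract_bracket_inner_parts_py := by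
  intro s _
  unfold Spec_extract_bracket_inner_parts_py extract_bracket_inner_parts_py extract_bracket_inner_parts_py_alt
  rw [pvGoA_eq, List.drop_zero, (pvMain s.toList.length).1 s.toList le_rfl []]
  simp
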